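-- pv_equiv track=rewrite | github.com/vkorotkikh/SUSY-BC4CG-Small-Library | bc4_small_library.py | binaries
-- ===== SOURCE A (Python) =====
-- def binaries(bin_code):
-- 	bin_code = int(bin_code)
-- 	binaries_lt	= [(0, [1,1,1,1]), (2, [1,-1,1,1]), (4, [1,1,-1,1]),
-- 					(6, [1,-1,-1,1]), (8, [1,1,1,-1]), (10, [1,-1,1,-1]),
-- 					(12, [1,1,-1,-1]), (14, [1,-1,-1,-1])]
--
-- 	for btuple in binaries_lt:
-- 		if bin_code == btuple[0]:
-- 			return btuple[1]
-- ===== SOURCE B (Python) =====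
-- def binaries(bin_code):
--     bin_code = int(bin_code)
--     if bin_code % 2 == 0 and 0 <= bin_code <= 14:
--         n = bin_code // 2
--         return [1, 1 - 2 * (n % 2), 1 - 2 * ((n // 2) % 2), 1 - 2 * ((n // 4) % 2)]
--     return None
-- ===== Notes on version B (the rewrite author's own statement) =====
-- stated objective: simpler
-- what changed: Replaces the 8-entry lookup table scan with a closed-form bit-to-sign computation: n = bin_code//2 and each sign is 1-2*bit.
import Mathlib
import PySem

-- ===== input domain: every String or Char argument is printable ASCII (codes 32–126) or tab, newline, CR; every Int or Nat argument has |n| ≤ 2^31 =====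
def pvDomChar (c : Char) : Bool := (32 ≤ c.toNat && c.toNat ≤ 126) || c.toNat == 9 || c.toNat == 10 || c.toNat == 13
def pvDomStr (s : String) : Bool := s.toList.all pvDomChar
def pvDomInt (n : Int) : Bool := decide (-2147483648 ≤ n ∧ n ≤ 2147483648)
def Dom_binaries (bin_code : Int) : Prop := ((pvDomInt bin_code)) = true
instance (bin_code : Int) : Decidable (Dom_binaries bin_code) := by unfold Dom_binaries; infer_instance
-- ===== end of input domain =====

-- B replaces A's 8-entry lookup-table scan with a closed-form bit-to-sign computation (simpler).


-- ===== PORT A =====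
-- the table, as in A
def binariesLt : List (Int × List Int) :=
  [(0, [1,1,1,1]), (2, [1,-1,1,1]), (4, [1,1,-1,1]),
   (6, [1,-1,-1,1]), (8, [1,1,1,-1]), (10, [1,-1,1,-1]),
   (12, [1,1,-1,-1]), (14, [1,-1,-1,-1])]

-- the 'for btuple in binaries_lt' loop: first match or fall through to None
def binariesScan (bc : Int) : List (Int × List Int) → Option (List Int)
  | [] => none
  | btuple :: rest => if bc = btuple.1 then some btuple.2 else binariesScan bc rest

def binaries (bin_code : Int) : Option (List Int) :=
  binariesScan bin_code binariesLt

-- ===== PORT B =====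
def binaries_alt (bin_code : Int) : Option (List Int) :=
  if PySem.Int.mod bin_code 2 = 0 ∧ 0 ≤ bin_code ∧ bin_code ≤ 14 then
    let n := PySem.Int.floordiv bin_code 2
    some [1, 1 - 2 * (PySem.Int.mod n 2), 1 - 2 * (PySem.Int.mod (PySem.Int.floordiv n 2) 2),
          1 - 2 * (PySem.Int.mod (PySem.Int.floordiv n 4) 2)]
  else
    none

-- ===== PRECONDITION & SPEC =====
def Spec_binaries (bin_code : Int) (out : Option (List Int)) : Prop := out = binaries_alt bin_code
instance (bin_code : Int) (out : Option (List Int)) : Decidable (Spec_binaries bin_code out) := by unfold Spec_binaries; infer_instance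

-- ===== CLAIM (what is proved, stated in full; the proofs are below) =====
def Claim_equal_binaries : Prop := ∀ (bin_code : Int), Dom_binaries bin_code → Spec_binaries bin_code (binaries bin_code)

-- ===== LEMMAS AND PROOFS =====
lemma binaries_agree (x : Int) : binaries x = binaries_alt x := by
  by_cases h : PySem.Int.mod x 2 = 0 ∧ 0 ≤ x ∧ x ≤ 14
  · -- x is one of 0,2,4,6,8,10,12,14
    have hx : x = 0 ∨ x = 2 ∨ x = 4 ∨ x = 6 ∨ x = 8 ∨ x = 10 ∨ x = 12 ∨ x = 14 := by
      obtain ⟨hm, h0, h14⟩ := h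
      simp [PySem.Int.mod, Int.fmod_eq_emod] at hm
      omega
    rcases hx with h|h|h|h|h|h|h|h <;> subst h <;> decide
  · -- B returns none; A's scan also fails on every table entry
    rw [binaries_alt, if_neg h]
    have hx : x ≠ 0 ∧ x ≠ 2 ∧ x ≠ 4 ∧ x ≠ 6 ∧ x ≠ 8 ∧ x ≠ 10 ∧ x ≠ 12 ∧ x ≠ 14 := by
      by_contra hc
      push_neg at hc
      apply h
      rcases (by tauto : x = 0 ∨ x = 2 ∨ x = 4 ∨ x = 6 ∨ x = 8 ∨ x = 10 ∨ x = 12 ∨ x = 14) with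
        h|h|h|h|h|h|h|h <;> subst h <;> decide
    obtain ⟨h0,h2,h4,h6,h8,h10,h12,h14⟩ := hx
    simp [binaries, binariesLt, binariesScan, h0, h2, h4, h6, h8, h10, h12, h14]

-- ===== VERDICT (by name: the statement is the Claim_ definition above) =====
theorem binaries_spec : Claim_equal_binaries := by
  intro x _
  unfold Spec_binaries
  exact binaries_agree x
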